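-- pv_equiv track=rewrite | github.com/SoftwareHeritage/swh-core | swh/core/tests/test_cli.py | assert_section_contains
-- ===== SOURCE A (Python) =====
-- from typing import List
--
-- def get_section(cli_output: str, section: str) -> List[str]:
--     """Get the given `section` of the `cli_output`"""
--     result = []
--     in_section = False
--     for line in cli_output.splitlines():
--         if not line:
--             continue
--
--         if in_section:
--             if not line.startswith(" "):
--                 break
--         else:
--             if line.startswith(section):
--                 in_section = True
--
--         if in_section:
--             result.append(line)
--
--     return result
--
-- def assert_section_contains(cli_output: str, section: str, snippet: str) -> bool:
--     """Check that a given `section` of the `cli_output` contains the given `snippet`"""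
--     section_lines = get_section(cli_output, section)
--     assert section_lines, "Section %s not found in output %r" % (section, cli_output)
--
--     for line in section_lines:
--         if snippet in line:
--             return True
--     else:
--         assert False, "%r not found in section %r of output %r" % (
--             snippet,
--             section,
--             cli_output,
--         )
-- ===== SOURCE B (Python) =====
-- def assert_section_contains(cli_output: str, section: str, snippet: str) -> bool:
--     """Check that a given `section` of the `cli_output` contains the given `snippet`"""
--     lines = [line for line in cli_output.splitlines() if line]
--     idx = next((k for k, line in enumerate(lines) if line.startswith(section)), None)
--     assert idx is not None, "Section %s not found in output %r" % (section, cli_output)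
--     body_len = 0
--     for line in lines[idx + 1:]:
--         if not line.startswith(" "):
--             break
--         body_len += 1
--     section_lines = lines[idx : idx + 1 + body_len]
--     assert any(snippet in line for line in section_lines), "%r not found in section %r of output %r" % (
--         snippet,
--         section,
--         cli_output,
--     )
--     return True
-- ===== Notes on version B (the rewrite author's own statement) =====
-- stated objective: alternative
-- what changed: Replaces A's single stateful scan (in_section flag with per-line branch and break) by a two-phase locate-then-collect: filter out empty lines once, find the index of the first line starting with section, then take the following lines while they start with a space, and test the snippet with any().
import Mathlib
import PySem

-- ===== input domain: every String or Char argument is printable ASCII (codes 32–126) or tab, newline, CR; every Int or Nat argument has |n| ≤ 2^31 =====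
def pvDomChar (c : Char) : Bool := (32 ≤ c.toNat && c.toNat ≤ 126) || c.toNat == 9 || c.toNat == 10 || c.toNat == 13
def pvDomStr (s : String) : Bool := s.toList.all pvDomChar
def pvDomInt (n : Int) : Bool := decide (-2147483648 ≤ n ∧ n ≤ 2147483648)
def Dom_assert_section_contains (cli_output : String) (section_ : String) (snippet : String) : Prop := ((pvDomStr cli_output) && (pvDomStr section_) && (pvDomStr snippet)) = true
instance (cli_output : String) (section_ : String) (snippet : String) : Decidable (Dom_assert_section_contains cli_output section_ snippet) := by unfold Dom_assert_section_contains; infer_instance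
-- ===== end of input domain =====

-- ===== PORT A =====
-- B changes the decomposition: locate the section header by index, then collect its
-- indented body, instead of A's stateful in_section/break scan (objective: alternative).
-- Python A raises AssertionError when the section or the snippet is absent; those inputs
-- are outside Pre_ (both ports return false there).

-- the loop of get_section: state = (in_section, result); `break` returns result
def pvGoA (section_ : String) : List String → Bool → List String → List String
  | [], _, result => result
  | line :: rest, inSec, result =>
    if line == "" then pvGoA section_ rest inSec result
    else if inSec then
      if !(PySem.Str.startswith line " ") then result
      else pvGoA section_ rest true (result ++ [line])
    else if PySem.Str.startswith line section_ then
      pvGoA section_ rest true (result ++ [line])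
    else pvGoA section_ rest false result

def pvGetSection (cli_output : String) (section_ : String) : List String :=
  pvGoA section_ (PySem.Str.splitlines cli_output) false []

-- the `for line in section_lines: if snippet in line: return True` loop; falling off → assert False
def pvSnipLoop (snippet : String) : List String → Bool
  | [] => false
  | line :: rest => if PySem.Str.isIn snippet line then true else pvSnipLoop snippet rest

def assert_section_contains (cli_output : String) (section_ : String) (snippet : String) : Bool :=
  let section_lines := pvGetSection cli_output section_
  if section_lines = [] then false  -- Python: assert fails (AssertionError), outside Pre_
  else pvSnipLoop snippet section_lines

-- ===== PORT B =====
-- Source B's `for line in lines[idx+1:]` counting loop (body_len)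
def pvBodyLen : List String → Nat
  | [] => 0
  | line :: rest => if PySem.Str.startswith line " " then pvBodyLen rest + 1 else 0

def assert_section_contains_alt (cli_output : String) (section_ : String) (snippet : String) : Bool :=
  let lines := (PySem.Str.splitlines cli_output).filter (fun l => !(l == ""))
  match lines.findIdx? (fun l => PySem.Str.startswith l section_) with
  | none => false  -- Python: assert fails (AssertionError), outside Pre_
  | some idx =>
    let bodyLen := pvBodyLen (lines.drop (idx + 1))
    let sectionLines := (lines.drop idx).take (1 + bodyLen)
    sectionLines.any (fun l => PySem.Str.isIn snippet l)

-- ===== PRECONDITION & SPEC =====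
-- Pre_ excludes exactly the inputs where Python A raises AssertionError (section header
-- absent, or snippet in no line of the section); A returns no value there.
def Pre_assert_section_contains (cli_output : String) (section_ : String) (snippet : String) : Prop :=
  (match ((PySem.Str.splitlines cli_output).filter (fun l => !(l == ""))).dropWhile
      (fun l => !(PySem.Str.startswith l section_)) with
   | [] => false
   | h :: t => (h :: t.takeWhile (fun l => PySem.Str.startswith l " ")).any
        (fun l => PySem.Str.isIn snippet l)) = true
instance (cli_output : String) (section_ : String) (snippet : String) : Decidable (Pre_assert_section_contains cli_output section_ snippet) := by unfold Pre_assert_section_contains; infer_instance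

def pvWitness_assert_section_contains : String × String × String := ("sec:\n  hello", "sec", "hell")

def Spec_assert_section_contains (cli_output : String) (section_ : String) (snippet : String) (out : Bool) : Prop := out = assert_section_contains_alt cli_output section_ snippet
instance (cli_output : String) (section_ : String) (snippet : String) (out : Bool) : Decidable (Spec_assert_section_contains cli_output section_ snippet out) := by unfold Spec_assert_section_contains; infer_instance

-- ===== CLAIM (what is proved, stated in full; the proofs are below) =====
def Claim_equal_assert_section_contains : Prop := ∀ (cli_output : String) (section_ : String) (snippet : String), Dom_assert_section_contains cli_output section_ snippet → Pre_assert_section_contains cli_output section_ snippet → Spec_assert_section_contains cli_output section_ snippet (assert_section_contains cli_output section_ snippet)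

-- ===== LEMMAS AND PROOFS =====

-- A's loop ignores empty lines, so it equals its run on the filtered list
theorem pvGoA_filter (section_ : String) (ls : List String) (b : Bool) (acc : List String) :
    pvGoA section_ ls b acc = pvGoA section_ (ls.filter (fun l => !(l == ""))) b acc := by
  induction ls generalizing b acc with
  | nil => rfl
  | cons l rest ih =>
    by_cases h : l = ""
    · subst h; simp [pvGoA, List.filter, ih]
    · have hb : (l == "") = false := by simp [h]
      simp only [List.filter, hb, Bool.not_false]
      cases b <;> simp only [pvGoA, hb, ih]

-- inside the section (no empty lines): collect while lines start with a space
theorem pvGoA_inSec (section_ : String) (ls : List String) (acc : List String)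
    (h : ∀ l ∈ ls, (l == "") = false) :
    pvGoA section_ ls true acc = acc ++ ls.takeWhile (fun l => PySem.Str.startswith l " ") := by
  induction ls generalizing acc with
  | nil => simp [pvGoA]
  | cons l rest ih =>
    have hl : (l == "") = false := h l (by simp)
    have hr : ∀ x ∈ rest, (x == "") = false := fun x hx => h x (by simp [hx])
    simp only [pvGoA, hl, List.takeWhile]
    cases PySem.Str.startswith l " " with
    | false => simp
    | true => simp [ih _ hr]

-- before the section (no empty lines): skip until the header, then collect
theorem pvGoA_search (section_ : String) (ls : List String)
    (h : ∀ l ∈ ls, (l == "") = false) :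
    pvGoA section_ ls false [] =
      match ls.dropWhile (fun l => !(PySem.Str.startswith l section_)) with
      | [] => []
      | hd :: t => hd :: t.takeWhile (fun l => PySem.Str.startswith l " ") := by
  induction ls with
  | nil => rfl
  | cons l rest ih =>
    have hl : (l == "") = false := h l (by simp)
    have hr : ∀ x ∈ rest, (x == "") = false := fun x hx => h x (by simp [hx])
    simp only [pvGoA, hl, List.dropWhile]
    cases PySem.Str.startswith l section_ with
    | false => simp [ih hr]
    | true => simp [pvGoA_inSec section_ rest [l] hr]

-- the snippet loop is List.any
theorem pvSnipLoop_eq_any (snippet : String) (ls : List String) :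
    pvSnipLoop snippet ls = ls.any (fun l => PySem.Str.isIn snippet l) := by
  induction ls with
  | nil => rfl
  | cons l rest ih =>
    simp only [pvSnipLoop, List.any_cons, ih]
    cases PySem.Str.isIn snippet l <;> simp

-- B's counted slice is head :: takeWhile of the tail
theorem pvTake_bodyLen (hd : String) (t : List String) :
    (hd :: t).take (1 + pvBodyLen t) = hd :: t.takeWhile (fun l => PySem.Str.startswith l " ") := by
  induction t generalizing hd with
  | nil => rfl
  | cons x rest ih =>
    simp only [pvBodyLen, List.takeWhile]
    cases hs : PySem.Str.startswith x " " with
    | false => simp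
    | true =>
      have := ih x
      simp only [Nat.add_comm 1, List.take_succ_cons] at *
      simpa [Nat.add_comm] using congrArg (hd :: ·) (by simpa [Nat.add_comm] using this)

-- B's locate-then-collect equals the dropWhile/takeWhile form
theorem pvAlt_core (section_ snippet : String) (ls : List String) :
    (match ls.findIdx? (fun l => PySem.Str.startswith l section_) with
     | none => false
     | some idx =>
       ((ls.drop idx).take (1 + pvBodyLen (ls.drop (idx + 1)))).any (fun l => PySem.Str.isIn snippet l)) =
    (match ls.dropWhile (fun l => !(PySem.Str.startswith l section_)) with
     | [] => false
     | hd :: t => (hd :: t.takeWhile (fun l => PySem.Str.startswith l " ")).any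
          (fun l => PySem.Str.isIn snippet l)) := by
  induction ls with
  | nil => rfl
  | cons l rest ih =>
    simp only [List.findIdx?_cons, List.dropWhile]
    cases hs : PySem.Str.startswith l section_ with
    | true =>
      simp [pvTake_bodyLen l rest]
    | false =>
      simp only [Bool.not_false]
      rw [← ih]
      cases rest.findIdx? (fun l => PySem.Str.startswith l section_) with
      | none => simp
      | some j => simp

theorem pvA_eq_alt (cli_output section_ snippet : String) :
    assert_section_contains cli_output section_ snippet =
    assert_section_contains_alt cli_output section_ snippet := by
  unfold assert_section_contains assert_section_contains_alt pvGetSection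
  rw [pvGoA_filter]
  set ls := (PySem.Str.splitlines cli_output).filter (fun l => !(l == "")) with hls
  have hne : ∀ l ∈ ls, (l == "") = false := by
    intro l hl
    rw [hls] at hl
    simpa using (List.of_mem_filter hl)
  rw [pvGoA_search section_ ls hne, pvAlt_core section_ snippet ls]
  cases hd : ls.dropWhile (fun l => !(PySem.Str.startswith l section_)) with
  | nil => simp
  | cons hd t => simp [pvSnipLoop_eq_any]

-- ===== VERDICT (by name: the statement is the Claim_ definition above) =====
theorem assert_section_contains_spec : Claim_equal_assert_section_contains := by
  intro cli_output section_ snippet _ _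
  unfold Spec_assert_section_contains
  exact pvA_eq_alt cli_output section_ snippet
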